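-- pv_equiv track=rewrite | github.com/NalinPlad/PiE-Robotics-Coding-Challenges | Challenges/modules/min_of_maxes.py | min_of_maxes
-- ===== SOURCE A (Python) =====
-- def min_of_maxes(nums,k):
--   count = 0
--   highest = None
--   lowest = None
--   for i in nums:
--     count += 1
--     if highest == None:
--       highest = i
--     if i > highest:
--       highest = i
--     if count == k:
--       if lowest == None:
--         lowest = highest
--       if highest < lowest:
--         lowest = highest
--       highest = None
--       count = 0
--   return lowest
-- ===== SOURCE B (Python) =====
-- def min_of_maxes(nums, k):
--     if k <= 0:
--         return None
--     maxes = []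
--     rest = list(nums)
--     while len(rest) >= k:
--         maxes.append(max(rest[:k]))
--         rest = rest[k:]
--     return min(maxes) if maxes else None
-- ===== Notes on version B (the rewrite author's own statement) =====
-- stated objective: alternative
-- what changed: Replaced A's one-pass counter/running-max/running-min state machine by an explicit chunk decomposition: guard k<=0, slice the list into complete k-chunks collecting each chunk's max via the builtin max, then return min of that list (None if empty).
import Mathlib
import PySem

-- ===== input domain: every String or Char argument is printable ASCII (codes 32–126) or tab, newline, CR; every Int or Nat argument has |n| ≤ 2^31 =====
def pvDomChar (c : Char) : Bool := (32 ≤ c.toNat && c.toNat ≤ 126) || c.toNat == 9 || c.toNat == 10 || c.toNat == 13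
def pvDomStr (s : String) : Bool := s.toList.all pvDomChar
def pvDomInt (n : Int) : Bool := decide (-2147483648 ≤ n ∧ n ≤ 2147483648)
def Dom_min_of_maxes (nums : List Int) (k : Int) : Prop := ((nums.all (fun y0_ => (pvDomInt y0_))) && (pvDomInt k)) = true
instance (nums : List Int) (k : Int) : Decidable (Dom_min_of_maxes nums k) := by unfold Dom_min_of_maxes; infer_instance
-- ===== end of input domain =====

-- B replaces A's one-pass counter/running-max/running-min state machine by an explicit
-- chunk decomposition (slice off complete k-chunks, collect each chunk's max, take min);
-- same asymptotic cost, a different decomposition.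

-- ===== PORT A =====
-- loop body of A's for-loop; state = (count, highest, lowest)
def stepA (k : Int) (s : Int × Option Int × Option Int) (i : Int) : Int × Option Int × Option Int :=
  let count := s.1 + 1
  -- if highest == None: highest = i  (afterwards highest is an Int)
  let highest : Int := match s.2.1 with | none => i | some h => h
  -- if i > highest: highest = i
  let highest : Int := if i > highest then i else highest
  if count = k then
    -- if lowest == None: lowest = highest
    let lowest : Int := match s.2.2 with | none => highest | some l => l
    -- if highest < lowest: lowest = highest
    let lowest : Int := if highest < lowest then highest else lowest
    (0, none, some lowest)
  else (count, some highest, s.2.2)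

def min_of_maxes (nums : List Int) (k : Int) : Option Int :=
  (nums.foldl (stepA k) (0, none, none)).2.2

-- ===== PORT B =====
-- the while-loop of Source B: while len(rest) >= k: maxes.append(max(rest[:k])); rest = rest[k:]
-- (the '0 < k' conjunct only guarantees termination; at every call site k > 0 holds, as in Source B)
-- rest[:k] with k ≥ 0 is rest.take k; max(chunk) via PySem.List.max? (chunk nonempty, so .getD 0 is never used)
def altLoop (k : Nat) (rest maxes : List Int) : List Int :=
  if 0 < k ∧ k ≤ rest.length then
    altLoop k (rest.drop k) (maxes ++ [(PySem.List.max? (rest.take k) (fun y => y)).getD 0])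
  else maxes
termination_by rest.length
decreasing_by simp_all [List.length_drop]; omega

def min_of_maxes_alt (nums : List Int) (k : Int) : Option Int :=
  if k ≤ 0 then none
  else PySem.List.min? (altLoop k.toNat nums []) (fun y => y)

-- ===== PRECONDITION & SPEC =====
def Spec_min_of_maxes (nums : List Int) (k : Int) (out : Option Int) : Prop := out = min_of_maxes_alt nums k
instance (nums : List Int) (k : Int) (out : Option Int) : Decidable (Spec_min_of_maxes nums k out) := by unfold Spec_min_of_maxes; infer_instance

-- ===== CLAIM (what is proved, stated in full; the proofs are below) =====
def Claim_equal_min_of_maxes : Prop := ∀ (nums : List Int) (k : Int), Dom_min_of_maxes nums k → Spec_min_of_maxes nums k (min_of_maxes nums k)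

-- ===== LEMMAS AND PROOFS =====

-- 'update the running minimum low with a new chunk max m' (the closing branch of A's loop)
def pvUpd (low : Option Int) (m : Int) : Option Int :=
  some (match low with | none => m | some l => if m < l then m else l)

-- common characterisation: fold the chunk maxima of the complete k-chunks into low
def specRec (k : Nat) (low : Option Int) : List Int → Option Int
  | [] => low
  | a :: t =>
      if k ≤ t.length + 1 ∧ 0 < k then
        specRec k (pvUpd low (List.foldl max a (t.take (k-1)))) (t.drop (k-1))
      else low
termination_by xs => xs.length
decreasing_by simp only [List.length_drop, List.length_cons]; omega

lemma specRec_nil (k : Nat) (low : Option Int) : specRec k low [] = low := by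
  rw [specRec]

lemma specRec_cons (k : Nat) (low : Option Int) (a : Int) (t : List Int) :
    specRec k low (a :: t)
      = if k ≤ t.length + 1 ∧ 0 < k then
          specRec k (pvUpd low (List.foldl max a (t.take (k-1)))) (t.drop (k-1))
        else low := by
  rw [specRec]

-- A's loop never closes a chunk when k ≤ 0
lemma loopA_nonpos (k : Int) (hk : k ≤ 0) : ∀ (ys : List Int) (c : Int) (h low : Option Int),
    0 ≤ c → (List.foldl (stepA k) (c, h, low) ys).2.2 = low := by
  intro ys
  induction ys with
  | nil => intro c h low _; rfl
  | cons a t ih =>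
    intro c h low hc
    have hne : ¬ (c + 1 = k) := by omega
    simp only [List.foldl_cons, stepA, hne, if_false]
    exact ih _ _ _ (by omega)

-- A's loop leaves lowest untouched while the current chunk cannot complete
lemma loopA_short (k : Int) : ∀ (ys : List Int) (c : Int) (h low : Option Int),
    c + ys.length < k → (List.foldl (stepA k) (c, h, low) ys).2.2 = low := by
  intro ys
  induction ys with
  | nil => intro c h low _; rfl
  | cons a t ih =>
    intro c h low hlt
    have hne : ¬ (c + 1 = k) := by simp only [List.length_cons] at hlt; omega
    simp only [List.foldl_cons, stepA, hne, if_false]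
    exact ih _ _ _ (by simp only [List.length_cons] at hlt ⊢; omega)

lemma ite_gt_eq_max (a b : Int) : (if a > b then a else b) = max b a := by
  split <;> omega

-- completing one chunk: from mid-chunk state (c, some hv, low), consuming the rest of
-- the chunk ys resets the state and folds the chunk max into low
lemma loopA_fill (k : Int) : ∀ (ys : List Int) (c hv : Int) (low : Option Int) (rest : List Int),
    c < k → c + ys.length = k →
    List.foldl (stepA k) (c, some hv, low) (ys ++ rest)
      = List.foldl (stepA k) (0, none, pvUpd low (ys.foldl max hv)) rest := by
  intro ys
  induction ys with
  | nil =>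
    intro c hv low rest hlt heq
    exfalso; simp only [List.length_nil] at heq; omega
  | cons a t ih =>
    intro c hv low rest hlt heq
    by_cases hcl : c + 1 = k
    · have ht : t = [] := by
        have : t.length = 0 := by simp at heq; omega
        simpa [List.length_eq_zero_iff] using this
      subst ht
      simp only [List.cons_append, List.nil_append, List.foldl_cons, stepA, hcl, if_pos,
        List.foldl_cons, List.foldl_nil, ite_gt_eq_max]
      cases low <;> simp [pvUpd]
    · have hlt' : c + 1 < k := by
        have : t.length ≠ 0 := by intro h0; simp [h0] at heq; omega
        simp at heq; omega
      simp only [List.cons_append, List.foldl_cons, stepA, hcl, if_false, ite_gt_eq_max]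
      exact ih (c+1) (max hv a) low rest hlt' (by simp only [List.length_cons] at heq ⊢; omega)

-- A's whole loop computes specRec
lemma loopA_spec (k : Int) (hk : 0 < k) : ∀ (n : Nat) (xs : List Int), xs.length ≤ n →
    ∀ (low : Option Int),
    (List.foldl (stepA k) (0, none, low) xs).2.2 = specRec k.toNat low xs := by
  intro n
  induction n with
  | zero =>
    intro xs hlen low
    have : xs = [] := by simpa [List.length_eq_zero_iff] using Nat.le_zero.mp hlen
    subst this; rw [specRec_nil]; rfl
  | succ n ih =>
    intro xs hlen low
    match xs with
    | [] => rw [specRec_nil]; rfl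
    | a :: t =>
      by_cases hsh : (k.toNat ≤ t.length + 1)
      · -- at least one complete chunk
        have hstep : stepA k (0, none, low) a
            = if (0:Int) + 1 = k then (0, none, pvUpd low a) else (1, some a, low) := by
          simp only [stepA]
          split
          · cases low <;> simp [pvUpd]
          · simp
        by_cases hk1 : k = 1
        · have : stepA k (0, none, low) a = (0, none, pvUpd low a) := by
            rw [hstep]; simp [hk1]
          rw [List.foldl_cons, this, ih t (by simpa using Nat.lt_succ_iff.mp (by simpa using hlen)) (pvUpd low a)]
          rw [specRec_cons]
          simp [hk1]
        · have hk2 : (1:Int) < k := by omega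
          have : stepA k (0, none, low) a = (1, some a, low) := by
            rw [hstep]; simp; omega
          rw [List.foldl_cons, this]
          have hlen' : (t.take (k.toNat - 1)).length = k.toNat - 1 := by
            simp [List.length_take]; omega
          have hfill := loopA_fill k (t.take (k.toNat - 1)) 1 a low (t.drop (k.toNat - 1)) hk2
              (by rw [hlen']; omega)
          rw [List.take_append_drop] at hfill
          rw [hfill,
            ih (t.drop (k.toNat - 1)) (by simp only [List.length_drop]; simp only [List.length_cons] at hlen; omega) _,
            specRec_cons, if_pos (And.intro hsh (by omega : 0 < k.toNat))]
      · -- no complete chunk: lowest stays low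
        have : (0:Int) + (a :: t).length < k := by simp at hsh ⊢; omega
        rw [loopA_short k (a :: t) 0 none low this, specRec_cons,
          if_neg (fun h => hsh h.1)]

-- appending one chunk max to maxes updates min(maxes) the way A's closing branch does
lemma min?_append_singleton (acc : List Int) (m : Int) :
    PySem.List.min? (acc ++ [m]) (fun y => y) = pvUpd (PySem.List.min? acc (fun y => y)) m := by
  cases acc with
  | nil =>
    have h0 : PySem.List.min? ([] : List Int) (fun y => y) = none := rfl
    simp [PySem.List.min?_id_cons, pvUpd, h0]
  | cons a t =>
    rw [List.cons_append, PySem.List.min?_id_cons, PySem.List.min?_id_cons,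
      List.foldl_append]
    simp only [List.foldl_cons, List.foldl_nil, pvUpd]
    congr 1
    split <;> omega

-- B's whole loop-then-min computes specRec
lemma altLoop_min (k : Nat) (hk : 0 < k) : ∀ (n : Nat) (rest : List Int), rest.length ≤ n →
    ∀ (acc : List Int),
    PySem.List.min? (altLoop k rest acc) (fun y => y)
      = specRec k (PySem.List.min? acc (fun y => y)) rest := by
  intro n
  induction n with
  | zero =>
    intro rest hlen acc
    have : rest = [] := by simpa [List.length_eq_zero_iff] using Nat.le_zero.mp hlen
    subst this
    rw [altLoop, if_neg (by simp only [List.length_nil]; omega), specRec_nil]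
  | succ n ih =>
    intro rest hlen acc
    match rest with
    | [] => rw [altLoop, if_neg (by simp only [List.length_nil]; omega), specRec_nil]
    | a :: t =>
      by_cases hch : k ≤ t.length + 1
      · rw [altLoop, if_pos ⟨hk, by simpa using hch⟩]
        have htake : (a :: t).take k = a :: t.take (k-1) := by
          cases k with
          | zero => omega
          | succ k' => simp
        have hdrop : (a :: t).drop k = t.drop (k-1) := by
          cases k with
          | zero => omega
          | succ k' => simp
        rw [htake, hdrop, PySem.List.max?_id_cons]
        rw [ih (t.drop (k-1)) (by simp only [List.length_drop]; simp only [List.length_cons] at hlen; omega) _]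
        rw [min?_append_singleton]
        rw [specRec_cons, if_pos (And.intro hch hk)]
        simp only [Option.getD_some]
      · rw [altLoop, if_neg (by simp only [List.length_cons]; omega),
          specRec_cons, if_neg (by simp [hch])]

-- ===== VERDICT (by name: the statement is the Claim_ definition above) =====
theorem min_of_maxes_spec : Claim_equal_min_of_maxes := by
  intro nums k _
  unfold Spec_min_of_maxes min_of_maxes min_of_maxes_alt
  by_cases hk : k ≤ 0
  · rw [if_pos hk]
    exact loopA_nonpos k hk nums 0 none none (by omega)
  · rw [if_neg hk]
    have hk' : 0 < k := by omega
    rw [loopA_spec k hk' nums.length nums le_rfl none,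
      altLoop_min k.toNat (by omega) nums.length nums le_rfl []]
    rfl
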